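-- pv_equiv track=rewrite | github.com/eirikora/NVE_Smartdok | nve_data/build_regine_index.py | replace_with_category
-- ===== SOURCE A (Python) =====
-- def replace_with_category(text: str, ending_map: dict[str, str]) -> str:
--     """Mapper hvert ord separat, f.eks. 'Storelva ved Oslofjorden' -> 'StorELV ved OsloFJORD'."""
--     words = text.strip().split()
--     endings = sorted(ending_map.keys(), key=len, reverse=True)
--     mapped = []
--     for w in words:
--         lw = w.lower()
--         for e in endings:
--             if lw.endswith(e) and len(lw) > len(e):
--                 w = w[: len(w) - len(e)] + ending_map[e]
--                 break
--         mapped.append(w)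
--     return " ".join(mapped)
-- ===== SOURCE B (Python) =====
-- def replace_with_category(text: str, ending_map: dict[str, str]) -> str:
--     """Mapper hvert ord separat, f.eks. 'Storelva ved Oslofjorden' -> 'StorELV ved OsloFJORD'."""
--     maxlen = max(map(len, ending_map), default=0)
--     out = []
--     for w in text.strip().split():
--         lw = w.lower()
--         for cut in range(max(1, len(w) - maxlen), len(w) + 1):
--             suf = lw[cut:]
--             if suf in ending_map:
--                 w = w[:cut] + ending_map[suf]
--                 break
--         out.append(w)
--     return " ".join(out)
-- ===== Notes on version B (the rewrite author's own statement) =====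
-- stated objective: alternative
-- what changed: Instead of sorting all endings by length and scanning the whole ending list with endswith for every word, B computes the longest ending length once and, per word, probes the dict directly with the word's own lowercased suffixes (at most that long), longest first; the sorted ending list and the per-word scan over all endings disappear.
import Mathlib
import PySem

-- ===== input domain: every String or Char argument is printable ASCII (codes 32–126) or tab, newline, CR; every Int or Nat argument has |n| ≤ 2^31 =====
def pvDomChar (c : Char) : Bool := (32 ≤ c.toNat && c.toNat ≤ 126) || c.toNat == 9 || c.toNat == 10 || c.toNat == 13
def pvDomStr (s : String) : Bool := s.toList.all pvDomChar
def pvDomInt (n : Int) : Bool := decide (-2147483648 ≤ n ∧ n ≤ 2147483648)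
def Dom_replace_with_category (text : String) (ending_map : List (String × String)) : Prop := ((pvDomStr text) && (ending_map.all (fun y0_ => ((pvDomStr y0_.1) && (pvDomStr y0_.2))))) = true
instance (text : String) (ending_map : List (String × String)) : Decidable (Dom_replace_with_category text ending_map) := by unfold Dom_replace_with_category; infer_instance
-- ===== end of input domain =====

-- B replaces A's scan over all length-sorted endings per word by direct dict lookups of the
-- word's own suffixes (no longer than the longest ending), longest first; same return value.

-- ===== PORT A =====
-- inner `for e in endings` loop of A; `d.getD e []` is `ending_map[e]` (e is always a key here)
def pvAWord (d : PySem.Dict (List Char) (List Char)) (w lw : List Char) :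
    List (List Char) → List Char
  | [] => w
  | e :: es =>
    if PySem.Chars.endswith lw e && decide (e.length < lw.length) then
      PySem.List.slice w none (some ((w.length - e.length : Nat) : Int)) ++ d.getD e []
    else pvAWord d w lw es

def replace_with_category (text : String) (ending_map : List (String × String)) : String :=
  let d := PySem.Dict.ofList (ending_map.map (fun p => (p.1.toList, p.2.toList)))
  let words := PySem.Chars.split₀ (PySem.Chars.strip text.toList)
  let endings := PySem.List.sorted d.keys (fun e => e.length) true
  let mapped := words.foldl (fun acc w => acc ++ [pvAWord d w (PySem.Chars.lower w) endings]) []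
  String.ofList (PySem.Chars.join [' '] mapped)

-- ===== PORT B =====
-- inner `for cut in range(max(1, len(w)-maxlen), len(w)+1)` loop of B;
-- `d.getD suf []` is `ending_map[suf]` (suf is always a key here)
def pvBWord (d : PySem.Dict (List Char) (List Char)) (w lw : List Char) :
    List Int → List Char
  | [] => w
  | cut :: rest =>
    let suf := PySem.List.slice lw (some cut) none
    if d.contains suf then
      PySem.List.slice w none (some cut) ++ d.getD suf []
    else pvBWord d w lw rest

def replace_with_category_alt (text : String) (ending_map : List (String × String)) : String :=
  let d := PySem.Dict.ofList (ending_map.map (fun p => (p.1.toList, p.2.toList)))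
  let maxlen := PySem.List.maxD (d.keys.map (fun e => (e.length : Int))) (fun x => x) 0
  let words := PySem.Chars.split₀ (PySem.Chars.strip text.toList)
  let mapped := words.foldl
    (fun acc w => acc ++ [pvBWord d w (PySem.Chars.lower w)
      (PySem.List.pyRange (max 1 ((w.length : Int) - maxlen)) ((w.length : Int) + 1) 1)]) []
  String.ofList (PySem.Chars.join [' '] mapped)

-- ===== PRECONDITION & SPEC =====
def Spec_replace_with_category (text : String) (ending_map : List (String × String)) (out : String) : Prop := out = replace_with_category_alt text ending_map
instance (text : String) (ending_map : List (String × String)) (out : String) : Decidable (Spec_replace_with_category text ending_map out) := by unfold Spec_replace_with_category; infer_instance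

-- ===== CLAIM (what is proved, stated in full; the proofs are below) =====
def Claim_equal_replace_with_category : Prop := ∀ (text : String) (ending_map : List (String × String)), Dom_replace_with_category text ending_map → Spec_replace_with_category text ending_map (replace_with_category text ending_map)

-- ===== LEMMAS AND PROOFS =====

-- canonical description both inner loops reduce to: first cut position in s..n whose suffix is a key
def pvCuts (s n : Nat) : List Nat := List.range' s (n + 1 - s)

def pvP (d : PySem.Dict (List Char) (List Char)) (lw : List Char) (c : Nat) : Bool :=
  d.contains (lw.drop c)

def pvApply (d : PySem.Dict (List Char) (List Char)) (w lw : List Char) : Option Nat → List Char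
  | none => w
  | some c => w.take c ++ d.getD (lw.drop c) []

theorem pvCuts_mem {s n c : Nat} (h : c ∈ pvCuts s n) : s ≤ c ∧ c ≤ n := by
  rw [pvCuts, List.mem_range'_1] at h
  omega

theorem pvCuts_mem_of {s n c : Nat} (h1 : s ≤ c) (h2 : c ≤ n) : c ∈ pvCuts s n := by
  rw [pvCuts, List.mem_range'_1]
  omega

theorem pvCuts_pairwise (s n : Nat) : (pvCuts s n).Pairwise (· < ·) :=
  List.pairwise_lt_range' 1

theorem pvB_char (d : PySem.Dict (List Char) (List Char)) (w lw : List Char) :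
    ∀ cs : List Nat, pvBWord d w lw (cs.map (fun c : Nat => (c : Int))) =
      pvApply d w lw (cs.find? (pvP d lw)) := by
  intro cs
  induction cs with
  | nil => rfl
  | cons c cs ih =>
    cases hc : d.contains (lw.drop c) with
    | true =>
      simp [pvBWord, pvP, hc, pvApply,
        PySem.List.slice_from lw (show (0:Int) ≤ (c:Int) by positivity),
        PySem.List.slice_to w (show (0:Int) ≤ (c:Int) by positivity)]
    | false =>
      simp [pvBWord, pvP, hc,
        PySem.List.slice_from lw (show (0:Int) ≤ (c:Int) by positivity)]
      exact ih

theorem pvRange_eq_cuts (s n : Nat) :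
    PySem.List.pyRange (s : Int) ((n : Int) + 1) 1 = (pvCuts s n).map (fun c : Nat => (c : Int)) := by
  rw [PySem.List.pyRange_of_pos _ _ (by norm_num : (0:Int) < 1)]
  rcases le_or_gt s n with h | h
  · have h1 : (s : Int) < (n : Int) + 1 := by omega
    have h2 : (((n : Int) + 1 - (s : Int) + 1 - 1) / 1).toNat = n + 1 - s := by
      rw [Int.ediv_one]; omega
    rw [if_pos h1, h2, pvCuts, List.range'_eq_map_range, List.map_map]
    apply List.map_congr_left
    intro k _
    simp
  · have h1 : ¬ ((s : Int) < (n : Int) + 1) := by omega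
    have h2 : n + 1 - s = 0 := by omega
    rw [if_neg h1, pvCuts, h2]
    simp

theorem pvFind?_sorted {cs : List Nat} {p : Nat → Bool} {c₀ : Nat}
    (hs : cs.Pairwise (· < ·)) (hm : c₀ ∈ cs) (hp : p c₀ = true)
    (hmin : ∀ c ∈ cs, c < c₀ → p c = false) : cs.find? p = some c₀ := by
  induction cs with
  | nil => cases hm
  | cons c cs ih =>
    rcases List.mem_cons.mp hm with rfl | hm'
    · simp [hp]
    · have hlt : c < c₀ := (List.pairwise_cons.mp hs).1 _ hm'
      have hc : p c = false := hmin c (List.mem_cons_self) hlt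
      simp only [List.find?_cons, hc]
      exact ih (List.pairwise_cons.mp hs).2 hm' (fun x hx => hmin x (List.mem_cons_of_mem _ hx))

theorem pvA_char (d : PySem.Dict (List Char) (List Char)) (w lw : List Char) (s : Nat)
    (hl : lw.length = w.length) (hs : 1 ≤ s) :
    ∀ es : List (List Char),
      es.Pairwise (fun a b => b.length ≤ a.length) →
      (∀ e ∈ es, d.contains e = true) →
      (∀ c ∈ pvCuts s w.length, pvP d lw c = true → lw.drop c ∈ es) →
      (∀ e ∈ es, e.length < w.length → s ≤ w.length - e.length) →
      pvAWord d w lw es = pvApply d w lw ((pvCuts s w.length).find? (pvP d lw)) := by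
  intro es
  induction es with
  | nil =>
    intro _ _ h3 _
    have : (pvCuts s w.length).find? (pvP d lw) = none := by
      rw [List.find?_eq_none]
      intro c hc hpc
      exact absurd (h3 c hc hpc) (List.not_mem_nil)
    rw [this]; rfl
  | cons e es ih =>
    intro h1 h2 h3 h4
    by_cases hcond : PySem.Chars.endswith lw e = true ∧ e.length < lw.length
    · -- head matches: it is the longest matching suffix
      obtain ⟨hend, hlen⟩ := hcond
      have hsuf : e <:+ lw := (PySem.Chars.endswith_iff lw e).mp hend
      have he : e = lw.drop (w.length - e.length) := by
        have := List.suffix_iff_eq_drop.mp hsuf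
        rw [hl] at this; exact this
      set c₀ := w.length - e.length with hc₀
      have hlen' : e.length < w.length := hl ▸ hlen
      have hc₀mem : c₀ ∈ pvCuts s w.length :=
        pvCuts_mem_of (h4 e List.mem_cons_self hlen') (by omega)
      have hpc₀ : pvP d lw c₀ = true := by
        unfold pvP; rw [← he]; exact h2 e List.mem_cons_self
      have hmin : ∀ c ∈ pvCuts s w.length, c < c₀ → pvP d lw c = false := by
        intro c hc hlt
        by_contra hne
        have hpc : pvP d lw c = true := by
          cases h : pvP d lw c with
          | true => rfl
          | false => exact absurd h hne
        have hin : lw.drop c ∈ e :: es := h3 c hc hpc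
        have hdl : (lw.drop c).length = w.length - c := by
          rw [List.length_drop, hl]
        have hb := pvCuts_mem hc
        have hgt : e.length < (lw.drop c).length := by omega
        rcases List.mem_cons.mp hin with heq | hmem
        · rw [← heq] at hgt; omega
        · have := (List.pairwise_cons.mp h1).1 _ hmem
          omega
      rw [pvFind?_sorted (pvCuts_pairwise s w.length) hc₀mem hpc₀ hmin]
      simp only [pvAWord, hend, hlen, decide_true, Bool.and_self, if_true,
        pvApply, PySem.List.slice_to _ (by positivity : (0:Int) ≤ ((w.length - e.length : Nat) : Int)),
        Int.toNat_natCast]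
      rw [← he]
    · -- head does not match: discard it and recurse
      have hfalse : (PySem.Chars.endswith lw e && decide (e.length < lw.length)) = false := by
        cases h : PySem.Chars.endswith lw e with
        | false => simp
        | true =>
          simp only [Bool.true_and, decide_eq_false_iff_not]
          exact fun hlt => hcond ⟨h, hlt⟩
      simp only [pvAWord, hfalse, Bool.false_eq_true, if_false]
      apply ih (List.pairwise_cons.mp h1).2
        (fun x hx => h2 x (List.mem_cons_of_mem _ hx))
      · intro c hc hpc
        rcases List.mem_cons.mp (h3 c hc hpc) with heq | hmem
        · exfalso
          have hb := pvCuts_mem hc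
          have hsuf : e <:+ lw := heq ▸ List.drop_suffix c lw
          have : e.length < lw.length := by
            rw [← heq, List.length_drop]
            omega
          exact hcond ⟨(PySem.Chars.endswith_iff lw e).mpr hsuf, this⟩
        · exact hmem
      · exact fun x hx => h4 x (List.mem_cons_of_mem _ hx)

theorem pvMaxD_bound (d : PySem.Dict (List Char) (List Char)) (e : List Char) (he : e ∈ d.keys) :
    (e.length : Int) ≤ PySem.List.maxD (d.keys.map (fun e => (e.length : Int))) (fun x => x) 0 := by
  unfold PySem.List.maxD
  rcases hm : PySem.List.max? (d.keys.map (fun e => (e.length : Int))) (fun x => x) with _ | m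
  · exfalso
    have := (PySem.List.max?_eq_none_iff _ (fun x : Int => x)).mp hm
    rw [List.map_eq_nil_iff] at this
    rw [this] at he
    exact List.not_mem_nil he
  · rw [hm, Option.getD_some]
    exact PySem.List.max?_isMax hm _ (List.mem_map_of_mem he)

theorem pvWord_eq (d : PySem.Dict (List Char) (List Char)) (ml : Int)
    (hml : ∀ e ∈ d.keys, (e.length : Int) ≤ ml) (w : List Char) :
    pvAWord d w (PySem.Chars.lower w) (PySem.List.sorted d.keys (fun e => e.length) true) =
    pvBWord d w (PySem.Chars.lower w)
      (PySem.List.pyRange (max 1 ((w.length : Int) - ml)) ((w.length : Int) + 1) 1) := by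
  set lw := PySem.Chars.lower w with hlw
  have hl : lw.length = w.length := by
    simp [hlw, PySem.Chars.lower]
  set s : Nat := (max 1 ((w.length : Int) - ml)).toNat with hsdef
  have hscast : ((s : Int)) = max 1 ((w.length : Int) - ml) := by
    rw [hsdef, Int.toNat_of_nonneg (by omega : (0:Int) ≤ max 1 ((w.length : Int) - ml))]
  have hs : 1 ≤ s := by omega
  rw [← hscast, pvRange_eq_cuts s w.length, pvB_char]
  apply pvA_char d w lw s hl hs _ (PySem.List.sorted_pairwise_rev d.keys (fun e => e.length))
  · intro e he
    exact (PySem.Dict.contains_iff_mem_keys d e).mpr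
      ((PySem.List.mem_sorted d.keys (fun e => e.length) true e).mp he)
  · intro c _ hpc
    exact (PySem.List.mem_sorted d.keys (fun e => e.length) true _).mpr
      ((PySem.Dict.contains_iff_mem_keys d _).mp hpc)
  · intro e he hlt
    have hb := hml e ((PySem.List.mem_sorted d.keys (fun e => e.length) true e).mp he)
    omega

-- ===== VERDICT (by name: the statement is the Claim_ definition above) =====
theorem replace_with_category_spec : Claim_equal_replace_with_category := by
  intro text ending_map _
  unfold Spec_replace_with_category replace_with_category replace_with_category_alt
  simp only [PySem.List.foldl_append_singleton_eq_map]
  congr 2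
  apply List.map_congr_left
  intro w _
  exact pvWord_eq _ _ (fun e he => pvMaxD_bound _ e he) w
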